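-- pv_equiv track=rewrite | github.com/mcoski8/tw | analysis/src/tw_analysis/features.py | decode_tier_positions
-- ===== SOURCE A (Python) =====
-- _MID_PAIRS_OF_6: tuple[tuple[int, int], ...] = tuple(
--     (a, b) for a in range(6) for b in range(a + 1, 6)
-- )
--
-- def decode_tier_positions(setting_index: int) -> tuple[int, tuple[int, int], tuple[int, int, int, int]]:
--     """
--     Return (top_pos, mid_positions, bot_positions) — all indices into the
--     7-card hand array. ``top_pos`` is a single int; ``mid_positions`` is a
--     2-tuple; ``bot_positions`` is a 4-tuple.
--     """
--     if not (0 <= setting_index < 105):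
--         raise ValueError(f"setting_index out of range: {setting_index}")
--     top_pos = setting_index // 15
--     mid_inner = setting_index % 15
--     remaining = [i for i in range(7) if i != top_pos]
--     a_in_6, b_in_6 = _MID_PAIRS_OF_6[mid_inner]
--     mid_positions = (remaining[a_in_6], remaining[b_in_6])
--     bot_positions = tuple(p for p in remaining if p not in mid_positions)
--     return top_pos, mid_positions, bot_positions
-- ===== SOURCE B (Python) =====
-- def decode_tier_positions(setting_index):
--     if not (0 <= setting_index < 105):
--         raise ValueError(f"setting_index out of range: {setting_index}")
--     top_pos, mid_inner = divmod(setting_index, 15)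
--     remaining = [i for i in range(7) if i != top_pos]
--     # arithmetic unranking of mid_inner into the ascending pair (a, b) of indices into remaining
--     a = 0
--     while mid_inner >= 5 - a:
--         mid_inner -= 5 - a
--         a += 1
--     b = a + 1 + mid_inner
--     mid_positions = (remaining[a], remaining[b])
--     bot_positions = tuple(remaining[i] for i in range(6) if i != a and i != b)
--     return top_pos, mid_positions, bot_positions
-- ===== Notes on version B (the rewrite author's own statement) =====
-- stated objective: simpler
-- what changed: Replaces the precomputed 15-entry pair table and the membership-filter for the bottom tier by direct arithmetic unranking of mid_inner into the index pair (a,b) and an index-based (not value-based) selection of the bottom positions.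
import Mathlib
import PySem

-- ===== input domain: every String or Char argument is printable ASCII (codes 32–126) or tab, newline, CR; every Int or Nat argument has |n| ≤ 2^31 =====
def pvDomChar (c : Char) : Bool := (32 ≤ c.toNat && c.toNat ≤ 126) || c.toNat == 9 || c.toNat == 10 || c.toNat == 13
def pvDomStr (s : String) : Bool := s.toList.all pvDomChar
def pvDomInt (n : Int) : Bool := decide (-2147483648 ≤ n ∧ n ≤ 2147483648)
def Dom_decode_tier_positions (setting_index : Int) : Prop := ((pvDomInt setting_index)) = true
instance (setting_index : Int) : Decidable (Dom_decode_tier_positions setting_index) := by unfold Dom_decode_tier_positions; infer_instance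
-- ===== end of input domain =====

-- B replaces A's precomputed pair table and value-membership bottom filter by arithmetic
-- unranking of mid_inner and index-based selection (objective: simpler).

-- ===== PORT A =====
-- tuple((a, b) for a in range(6) for b in range(a + 1, 6))
def pvMidPairsOf6 : List (Int × Int) :=
  (PySem.List.pyRange 0 6 1).flatMap (fun a => (PySem.List.pyRange (a + 1) 6 1).map (fun b => (a, b)))

def decode_tier_positions (setting_index : Int) : Int × (Int × Int) × (Int × Int × Int × Int) :=
  let top_pos := PySem.Int.floordiv setting_index 15
  let mid_inner := PySem.Int.mod setting_index 15
  let remaining := (PySem.List.pyRange 0 7 1).filter (fun i => i != top_pos)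
  let ab := (PySem.List.pyGet? pvMidPairsOf6 mid_inner).getD (0, 0)  -- in range for 0 ≤ setting_index < 105 (Pre_)
  let m1 := (PySem.List.pyGet? remaining ab.1).getD 0
  let m2 := (PySem.List.pyGet? remaining ab.2).getD 0
  let bot := remaining.filter (fun p => p != m1 && p != m2)
  match bot with
  | [b1, b2, b3, b4] => (top_pos, (m1, m2), (b1, b2, b3, b4))
  | _ => (top_pos, (m1, m2), (0, 0, 0, 0))  -- unreachable under Pre_

-- ===== PORT B =====
-- the while loop of Source B: a starts at 0, runs at most 5 times (fuel 6); returns (a, leftover mid_inner)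
def pvUnrank (mid_inner : Int) (a : Int) : Nat → Int × Int
  | 0 => (a, mid_inner)
  | fuel + 1 =>
    if mid_inner ≥ 5 - a then pvUnrank (mid_inner - (5 - a)) (a + 1) fuel
    else (a, mid_inner)

def decode_tier_positions_alt (setting_index : Int) : Int × (Int × Int) × (Int × Int × Int × Int) :=
  let dm := (PySem.Int.divmod? setting_index 15).getD (0, 0)
  let top_pos := dm.1
  let remaining := (PySem.List.pyRange 0 7 1).filter (fun i => i != top_pos)
  let am := pvUnrank dm.2 0 6
  let a := am.1
  let b := a + 1 + am.2
  let mp1 := (PySem.List.pyGet? remaining a).getD 0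
  let mp2 := (PySem.List.pyGet? remaining b).getD 0
  let bot := ((PySem.List.pyRange 0 6 1).filter (fun i => i != a && i != b)).map
    (fun i => (PySem.List.pyGet? remaining i).getD 0)
  (top_pos, (mp1, mp2), (bot.getD 0 0, bot.getD 1 0, bot.getD 2 0, bot.getD 3 0))

-- ===== PRECONDITION & SPEC =====
-- A raises ValueError exactly when setting_index is outside [0, 105)
def Pre_decode_tier_positions (setting_index : Int) : Prop := 0 ≤ setting_index ∧ setting_index < 105
instance (setting_index : Int) : Decidable (Pre_decode_tier_positions setting_index) := by unfold Pre_decode_tier_positions; infer_instance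
def pvWitness_decode_tier_positions : Int := 42

def Spec_decode_tier_positions (setting_index : Int) (out : Int × (Int × Int) × (Int × Int × Int × Int)) : Prop := out = decode_tier_positions_alt setting_index
instance (setting_index : Int) (out : Int × (Int × Int) × (Int × Int × Int × Int)) : Decidable (Spec_decode_tier_positions setting_index out) := by unfold Spec_decode_tier_positions; infer_instance

-- ===== CLAIM (what is proved, stated in full; the proofs are below) =====
def Claim_equal_decode_tier_positions : Prop := ∀ (setting_index : Int), Dom_decode_tier_positions setting_index → Pre_decode_tier_positions setting_index → Spec_decode_tier_positions setting_index (decode_tier_positions setting_index)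

-- ===== LEMMAS AND PROOFS =====
set_option maxHeartbeats 4000000 in
set_option maxRecDepth 10000 in
theorem pv_agree_on_range :
    ∀ n ∈ List.range 105, decode_tier_positions (Int.ofNat n) = decode_tier_positions_alt (Int.ofNat n) := by
  decide

-- ===== VERDICT (by name: the statement is the Claim_ definition above) =====
theorem decode_tier_positions_spec : Claim_equal_decode_tier_positions := by
  intro i _ hpre
  unfold Spec_decode_tier_positions
  obtain ⟨h0, h105⟩ := hpre
  have hi : i = Int.ofNat i.toNat := (Int.toNat_of_nonneg h0).symm
  rw [hi]
  exact pv_agree_on_range i.toNat (List.mem_range.mpr (by omega))
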